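-- pv_equiv track=rewrite | github.com/fajardofahad/abov3-genesis | abov3/modules/multi_edit/conflict/resolver.py | _find_line_overlaps
-- ===== SOURCE A (Python) =====
-- from typing import Dict, List, Optional, Tuple, Any, Set
--
-- def _find_line_overlaps(lines1: Set[int], lines2: Set[int]) -> List[Tuple[int, int]]:
--     """Find overlapping line ranges"""
--     overlaps = []
--     intersection = lines1.intersection(lines2)
--
--     if intersection:
--         # Convert to ranges
--         sorted_lines = sorted(intersection)
--         start = sorted_lines[0]
--         end = sorted_lines[0]
--
--         for line in sorted_lines[1:]:
--             if line == end + 1: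
--                 end = line
--             else:
--                 overlaps.append((start, end + 1))
--                 start = line
--                 end = line
--
--         overlaps.append((start, end + 1))
--
--     return overlaps
-- ===== SOURCE B (Python) =====
-- def _find_line_overlaps(lines1, lines2):
--     """Find overlapping line ranges via boundary detection: a line starts a
--     range iff its predecessor is absent, and ends one iff its successor is
--     absent; pair the sorted boundaries up."""
--     common = set(lines1) & set(lines2)
--     starts = sorted(x for x in common if x - 1 not in common)
--     ends = sorted(x for x in common if x + 1 not in common)
--     return [(a, b + 1) for a, b in zip(starts, ends)]
-- ===== Notes on version B (the rewrite author's own statement) =====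
-- stated objective: alternative
-- what changed: Replaces A's sequential start/end merging scan over the sorted intersection with boundary detection by set membership: a line starts a range iff x-1 is not in the intersection and ends one iff x+1 is not, and the two sorted boundary lists are zipped into (start, end+1) pairs.
import Mathlib
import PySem

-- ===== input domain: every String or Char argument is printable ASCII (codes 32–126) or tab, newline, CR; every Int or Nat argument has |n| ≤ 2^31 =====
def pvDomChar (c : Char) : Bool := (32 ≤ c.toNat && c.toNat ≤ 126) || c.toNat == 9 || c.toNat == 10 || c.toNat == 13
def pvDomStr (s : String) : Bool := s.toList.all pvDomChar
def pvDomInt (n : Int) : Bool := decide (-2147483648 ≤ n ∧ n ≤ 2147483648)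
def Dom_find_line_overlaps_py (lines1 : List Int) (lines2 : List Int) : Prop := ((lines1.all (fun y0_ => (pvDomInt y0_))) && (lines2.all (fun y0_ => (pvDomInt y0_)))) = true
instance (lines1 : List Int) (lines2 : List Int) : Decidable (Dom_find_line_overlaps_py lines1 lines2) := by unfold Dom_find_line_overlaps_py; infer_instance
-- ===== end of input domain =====

-- B replaces A's sequential start/end merging scan with boundary detection by set
-- membership (a line starts a range iff x-1 is absent, ends one iff x+1 is absent),
-- pairing the two sorted boundary lists; return value only, no mutation involved.

-- ===== PORT A =====
-- the 'for line in sorted_lines[1:]' loop, carrying (start, end, overlaps)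
def pvALoop (rest : List Int) (start end_ : Int) (acc : List (Int × Int)) : List (Int × Int) :=
  match rest with
  | [] => acc ++ [(start, end_ + 1)]
  | l :: t =>
    if l = end_ + 1 then pvALoop t start l acc
    else pvALoop t l l (acc ++ [(start, end_ + 1)])

-- 'if intersection:' + the loop over sorted_lines[1:], start = end = sorted_lines[0]
def pvA (sorted_lines : List Int) : List (Int × Int) :=
  match sorted_lines with
  | [] => []
  | s0 :: rest => pvALoop rest s0 s0 []

def find_line_overlaps_py (lines1 : List Int) (lines2 : List Int) : List (Int × Int) :=
  pvA (PySem.List.sorted (PySem.Set.inter (PySem.Set.ofList lines1) lines2) (fun x => x) false)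

-- ===== PORT B =====
-- tuple builder of B's final comprehension: (a, b + 1)
def pvF (a b : Int) : Int × Int := (a, b + 1)

-- B's body on the computed intersection 'common': the two sorted boundary filters, zipped
def pvBPair (common : PySem.Set Int) : List (Int × Int) :=
  List.zipWith pvF
    (PySem.List.sorted (common.filter (fun x => !(PySem.Set.contains common (x - 1)))) (fun x => x) false)
    (PySem.List.sorted (common.filter (fun x => !(PySem.Set.contains common (x + 1)))) (fun x => x) false)

def find_line_overlaps_py_alt (lines1 : List Int) (lines2 : List Int) : List (Int × Int) :=
  pvBPair (PySem.Set.inter (PySem.Set.ofList lines1) (PySem.Set.ofList lines2))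

-- ===== PRECONDITION & SPEC =====
def Spec_find_line_overlaps_py (lines1 : List Int) (lines2 : List Int) (out : List (Int × Int)) : Prop := out = find_line_overlaps_py_alt lines1 lines2
instance (lines1 : List Int) (lines2 : List Int) (out : List (Int × Int)) : Decidable (Spec_find_line_overlaps_py lines1 lines2 out) := by unfold Spec_find_line_overlaps_py; infer_instance

-- ===== CLAIM (what is proved, stated in full; the proofs are below) =====
def Claim_equal_find_line_overlaps_py : Prop := ∀ (lines1 : List Int) (lines2 : List Int), Dom_find_line_overlaps_py lines1 lines2 → Spec_find_line_overlaps_py lines1 lines2 (find_line_overlaps_py lines1 lines2)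

-- ===== LEMMAS AND PROOFS =====

-- A's loop on a strictly increasing list (e :: t) produces the zip of the boundary filters
theorem pvALoop_zip (t : List Int) : ∀ (e s : Int) (acc : List (Int × Int)),
    (e :: t).Pairwise (· < ·) →
    pvALoop t s e acc = acc ++ List.zipWith pvF
      (s :: t.filter (fun x => !decide ((x - 1) ∈ (e :: t))))
      ((e :: t).filter (fun x => !decide ((x + 1) ∈ t))) := by
  induction t with
  | nil => intro e s acc _; simp [pvALoop, pvF]
  | cons l t ih =>
    intro e s acc h
    have hel : e < l := (List.pairwise_cons.1 h).1 l (by simp)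
    have h' : (l :: t).Pairwise (· < ·) := (List.pairwise_cons.1 h).2
    have hlt : ∀ x ∈ t, l < x := fun x hx => (List.pairwise_cons.1 h').1 x hx
    have htail_starts : List.filter (fun x => !decide ((x - 1) ∈ (e :: l :: t))) t
        = List.filter (fun x => !decide ((x - 1) ∈ (l :: t))) t := by
      apply List.filter_congr
      intro x hx
      have hx1 : l < x := hlt x hx
      have : ((x - 1) ∈ (e :: l :: t)) ↔ ((x - 1) ∈ (l :: t)) := by
        simp only [List.mem_cons]
        constructor
        · rintro (h1 | hr)
          · exfalso; omega
          · exact hr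
        · intro hr; right; exact hr
      simp [this]
    have htail_ends : List.filter (fun x => !decide ((x + 1) ∈ (l :: t))) (l :: t)
        = List.filter (fun x => !decide ((x + 1) ∈ t)) (l :: t) := by
      apply List.filter_congr
      intro x hx
      have hxl : l ≤ x := by
        rcases List.mem_cons.1 hx with h1 | h2
        · omega
        · exact le_of_lt (hlt x h2)
      have : ((x + 1) ∈ (l :: t)) ↔ ((x + 1) ∈ t) := by
        simp only [List.mem_cons]
        constructor
        · rintro (h1 | hr)
          · exfalso; omega
          · exact hr
        · intro hr; right; exact hr
      simp [this]
    by_cases hle : l = e + 1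
    · rw [pvALoop, if_pos hle, ih l s acc h']
      have hstarts : List.filter (fun x => !decide ((x - 1) ∈ (e :: l :: t))) (l :: t)
          = List.filter (fun x => !decide ((x - 1) ∈ (l :: t))) t := by
        rw [List.filter_cons]
        have hl : (l - 1) ∈ (e :: l :: t) := by simp only [List.mem_cons]; left; omega
        simp only [hl, decide_true, Bool.not_true, Bool.false_eq_true, if_false]
        exact htail_starts
      have hends : List.filter (fun x => !decide ((x + 1) ∈ (l :: t))) (e :: l :: t)
          = List.filter (fun x => !decide ((x + 1) ∈ t)) (l :: t) := by
        rw [List.filter_cons]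
        have he1 : (e + 1) ∈ (l :: t) := by simp only [List.mem_cons]; left; omega
        simp only [he1, decide_true, Bool.not_true, Bool.false_eq_true, if_false]
        exact htail_ends
      rw [hstarts, hends]
    · rw [pvALoop, if_neg hle, ih l l (acc ++ [(s, e + 1)]) h']
      have hl1 : e + 1 < l := by omega
      have hstarts : List.filter (fun x => !decide ((x - 1) ∈ (e :: l :: t))) (l :: t)
          = l :: List.filter (fun x => !decide ((x - 1) ∈ (l :: t))) t := by
        rw [List.filter_cons]
        have hl : ¬ ((l - 1) ∈ (e :: l :: t)) := by
          simp only [List.mem_cons]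
          rintro (h1 | h1 | h1)
          · omega
          · omega
          · exact absurd (hlt _ h1) (by omega)
        simp only [hl, decide_false, Bool.not_false, if_true]
        rw [htail_starts]
      have hends : List.filter (fun x => !decide ((x + 1) ∈ (l :: t))) (e :: l :: t)
          = e :: List.filter (fun x => !decide ((x + 1) ∈ t)) (l :: t) := by
        rw [List.filter_cons]
        have he1 : ¬ ((e + 1) ∈ (l :: t)) := by
          simp only [List.mem_cons]
          rintro (h1 | h1)
          · omega
          · exact absurd (hlt _ h1) (by omega)
        simp only [he1, decide_false, Bool.not_false, if_true]
        rw [htail_ends]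
      rw [hstarts, hends]
      simp [List.zipWith, pvF, List.append_assoc]

-- A's whole computation on a strictly increasing list L
theorem pvA_runs (L : List Int) (h : L.Pairwise (· < ·)) :
    pvA L =
    List.zipWith pvF (L.filter (fun x => !decide ((x - 1) ∈ L))) (L.filter (fun x => !decide ((x + 1) ∈ L))) := by
  cases L with
  | nil => rfl
  | cons a t =>
    have hlt : ∀ x ∈ t, a < x := fun x hx => (List.pairwise_cons.1 h).1 x hx
    show pvALoop t a a [] = _

    rw [pvALoop_zip t a a [] h, List.nil_append]
    have hstarts : List.filter (fun x => !decide ((x - 1) ∈ (a :: t))) (a :: t)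
        = a :: List.filter (fun x => !decide ((x - 1) ∈ (a :: t))) t := by
      rw [List.filter_cons]
      have ha : ¬ ((a - 1) ∈ (a :: t)) := by
        simp only [List.mem_cons]
        rintro (h1 | h1)
        · omega
        · exact absurd (hlt _ h1) (by omega)
      simp only [ha, decide_false, Bool.not_false, if_true]
    have hends : List.filter (fun x => !decide ((x + 1) ∈ (a :: t))) (a :: t)
        = List.filter (fun x => !decide ((x + 1) ∈ t)) (a :: t) := by
      apply List.filter_congr
      intro x hx
      have hxa : a ≤ x := by
        rcases List.mem_cons.1 hx with h1 | h2
        · omega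
        · exact le_of_lt (hlt x h2)
      have : ((x + 1) ∈ (a :: t)) ↔ ((x + 1) ∈ t) := by
        simp only [List.mem_cons]
        constructor
        · rintro (h1 | hr)
          · exfalso; omega
          · exact hr
        · intro hr; right; exact hr
      simp [this]
    rw [hstarts, hends]

-- the two intersection lists are the same list
theorem pvInter_eq (lines1 lines2 : List Int) :
    PySem.Set.inter (PySem.Set.ofList lines1) lines2 =
      PySem.Set.inter (PySem.Set.ofList lines1) (PySem.Set.ofList lines2) := by
  unfold PySem.Set.inter
  apply List.filter_congr
  intro x _
  simp [PySem.Set.contains, PySem.Set.mem_ofList]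

-- contains on S agrees with decidable membership in any list with the same members
theorem pvContains_eq (S L : List Int) (h : ∀ y, y ∈ S ↔ y ∈ L) (y : Int) :
    PySem.Set.contains S y = decide (y ∈ L) := by
  by_cases hy : y ∈ L
  · simp [hy]
    exact (h y).2 hy
  · simp [hy]
    exact fun hs => hy ((h y).1 hs)

-- sorting a filtered nodup list = filtering the sorted list
theorem pvSortedFilter (S : List Int) (p : Int → Bool)
    (h : (PySem.List.sorted S (fun x => x) false).Pairwise (· < ·)) :
    PySem.List.sorted (S.filter p) (fun x => x) false =
      (PySem.List.sorted S (fun x => x) false).filter p := by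
  apply PySem.List.sorted_eq_of_perm_of_pairwise_lt
  · exact (PySem.List.sorted_perm S (fun x => x) false).filter p
  · exact List.Pairwise.sublist List.filter_sublist h

-- ===== VERDICT (by name: the statement is the Claim_ definition above) =====
theorem find_line_overlaps_py_spec : Claim_equal_find_line_overlaps_py := by
  intro lines1 lines2 _
  unfold Spec_find_line_overlaps_py find_line_overlaps_py find_line_overlaps_py_alt pvBPair
  rw [← pvInter_eq]
  set S := PySem.Set.inter (PySem.Set.ofList lines1) lines2 with hS
  set L := PySem.List.sorted S (fun x => x) false with hL
  have hSnd : S.Nodup := List.Nodup.filter _ (PySem.Set.nodup_ofList lines1)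
  have hLnd : L.Nodup := ((PySem.List.sorted_perm S (fun x => x) false).nodup_iff).mpr hSnd
  have hpair : L.Pairwise (· < ·) := by
    have hle := PySem.List.sorted_pairwise S (fun x => x)
    exact hle.imp₂ (fun a b hab hne => lt_of_le_of_ne hab hne) hLnd
  have hmem : ∀ y, y ∈ S ↔ y ∈ L :=
    fun y => ((PySem.List.sorted_perm S (fun x => x) false).mem_iff).symm
  have hc : ∀ y, PySem.Set.contains S y = decide (y ∈ L) := pvContains_eq S L hmem
  rw [pvSortedFilter S _ hpair, pvSortedFilter S _ hpair, ← hL]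
  simp only [hc]
  exact pvA_runs L hpair
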